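-- pv_equiv track=rewrite | github.com/collinsakenga/codewars_solutions | 6 kyu/6 kyu_Most Frequent Weekdays.py | most_frequent_days
-- ===== SOURCE A (Python) =====
-- def most_frequent_days(year):
--     days = ["Monday", "Tuesday", "Wednesday",
--             "Thursday", "Friday", "Saturday", "Sunday"]
--     if year == 2000:
--         return ['Saturday', 'Sunday']
--     check = 2000
--     if year > check:
--         day = 6
--         while check < year:
--             check += 1
--             day += 2 if leap(check) else 1
--         if day % 7 == 0:
--             return [days[(day) % 7], days[(day-1) % 7]] if leap(year) else [days[day % 7]]
--         return [days[(day-1) % 7], days[(day) % 7]] if leap(year) else [days[day % 7]]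
--     elif year < check:
--         day = 5
--         while check > year:
--             check -= 1
--             day -= 2 if leap(check) else 1
--         if (day+1) % 7 == 0:
--             return [days[(day+1) % 7], days[day % 7]] if leap(year) else [days[day % 7]]
--         return [days[day % 7], days[(day+1) % 7]] if leap(year) else [days[day % 7]]
--
-- def leap(year):
--     if year % 400 == 0:
--         return True
--     elif year % 100 == 0:
--         return False
--     elif year % 4 == 0:
--         return True
--     return False
-- ===== SOURCE B (Python) =====
-- def leap(year):
--     return year % 4 == 0 and (year % 100 != 0 or year % 400 == 0)
--
-- def _leapcount(n):
--     # number of leap years y with 1 <= ... closed-form prefix count n//4 - n//100 + n//400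
--     return n // 4 - n // 100 + n // 400
--
-- def most_frequent_days(year):
--     days = ["Monday", "Tuesday", "Wednesday",
--             "Thursday", "Friday", "Saturday", "Sunday"]
--     if year == 2000:
--         return ['Saturday', 'Sunday']
--     if year > 2000:
--         d = (6 + (year - 2000) + (_leapcount(year) - _leapcount(2000))) % 7
--         if leap(year):
--             return [days[d], days[(d - 1) % 7]] if d == 0 else [days[(d - 1) % 7], days[d]]
--         return [days[d]]
--     d = (5 - (2000 - year) - (_leapcount(1999) - _leapcount(year - 1))) % 7
--     if leap(year):
--         return [days[(d + 1) % 7], days[d]] if (d + 1) % 7 == 0 else [days[d], days[(d + 1) % 7]]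
--     return [days[d]]
-- ===== Notes on version B (the rewrite author's own statement) =====
-- stated objective: faster
-- what changed: Replaces A's year-by-year while loop from 2000 to the target year with a closed-form leap-year prefix count (n//4 - n//100 + n//400), computing the day offset mod 7 in O(1) while keeping the same branch/order logic.
import Mathlib
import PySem

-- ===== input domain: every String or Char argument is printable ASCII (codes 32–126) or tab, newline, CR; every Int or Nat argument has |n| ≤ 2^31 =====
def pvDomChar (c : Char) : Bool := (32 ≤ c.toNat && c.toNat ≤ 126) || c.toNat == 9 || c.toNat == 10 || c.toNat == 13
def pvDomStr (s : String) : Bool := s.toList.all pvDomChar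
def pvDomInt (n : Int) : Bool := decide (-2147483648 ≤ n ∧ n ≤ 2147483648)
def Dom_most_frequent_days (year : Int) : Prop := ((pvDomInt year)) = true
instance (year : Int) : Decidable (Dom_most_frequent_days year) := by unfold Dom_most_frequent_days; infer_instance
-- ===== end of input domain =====

-- B replaces A's year-by-year while loop with a closed-form leap-year prefix count, giving the
-- day offset mod 7 in O(1) (objective: faster).

-- ===== PORT A =====
def leap (year : Int) : Bool :=
  if PySem.Int.mod year 400 == 0 then true
  else if PySem.Int.mod year 100 == 0 then false
  else if PySem.Int.mod year 4 == 0 then true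
  else false

def pvDaysA : List String :=
  ["Monday", "Tuesday", "Wednesday", "Thursday", "Friday", "Saturday", "Sunday"]

-- while check < year: check += 1; day += 2 if leap(check) else 1
def pvUp (year check day : Int) : Int :=
  if h : check < year then
    pvUp year (check + 1) (day + (if leap (check + 1) then 2 else 1))
  else day
termination_by (year - check).toNat
decreasing_by omega

-- while check > year: check -= 1; day -= 2 if leap(check) else 1
def pvDown (year check day : Int) : Int :=
  if h : check > year then
    pvDown year (check - 1) (day - (if leap (check - 1) then 2 else 1))
  else day
termination_by (check - year).toNat
decreasing_by omega

def most_frequent_days (year : Int) : List String :=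
  let days := pvDaysA
  if year == 2000 then ["Saturday", "Sunday"]
  else if year > 2000 then
    let day := pvUp year 2000 6
    if PySem.Int.mod day 7 == 0 then
      if leap year then
        [PySem.List.pyGetD days (PySem.Int.mod day 7) "",
         PySem.List.pyGetD days (PySem.Int.mod (day - 1) 7) ""]
      else [PySem.List.pyGetD days (PySem.Int.mod day 7) ""]
    else
      if leap year then
        [PySem.List.pyGetD days (PySem.Int.mod (day - 1) 7) "",
         PySem.List.pyGetD days (PySem.Int.mod day 7) ""]
      else [PySem.List.pyGetD days (PySem.Int.mod day 7) ""]
  else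
    let day := pvDown year 2000 5
    if PySem.Int.mod (day + 1) 7 == 0 then
      if leap year then
        [PySem.List.pyGetD days (PySem.Int.mod (day + 1) 7) "",
         PySem.List.pyGetD days (PySem.Int.mod day 7) ""]
      else [PySem.List.pyGetD days (PySem.Int.mod day 7) ""]
    else
      if leap year then
        [PySem.List.pyGetD days (PySem.Int.mod day 7) "",
         PySem.List.pyGetD days (PySem.Int.mod (day + 1) 7) ""]
      else [PySem.List.pyGetD days (PySem.Int.mod day 7) ""]

-- ===== PORT B =====
def leapB (year : Int) : Bool :=
  PySem.Int.mod year 4 == 0 && (PySem.Int.mod year 100 != 0 || PySem.Int.mod year 400 == 0)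

-- closed-form leap-year prefix count n//4 - n//100 + n//400
def lcB (n : Int) : Int :=
  PySem.Int.floordiv n 4 - PySem.Int.floordiv n 100 + PySem.Int.floordiv n 400

def pvDaysB : List String :=
  ["Monday", "Tuesday", "Wednesday", "Thursday", "Friday", "Saturday", "Sunday"]

def most_frequent_days_alt (year : Int) : List String :=
  let days := pvDaysB
  if year == 2000 then ["Saturday", "Sunday"]
  else if year > 2000 then
    let d := PySem.Int.mod (6 + (year - 2000) + (lcB year - lcB 2000)) 7
    if leapB year then
      if d == 0 then
        [PySem.List.pyGetD days d "", PySem.List.pyGetD days (PySem.Int.mod (d - 1) 7) ""]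
      else
        [PySem.List.pyGetD days (PySem.Int.mod (d - 1) 7) "", PySem.List.pyGetD days d ""]
    else [PySem.List.pyGetD days d ""]
  else
    let d := PySem.Int.mod (5 - (2000 - year) - (lcB 1999 - lcB (year - 1))) 7
    if leapB year then
      if PySem.Int.mod (d + 1) 7 == 0 then
        [PySem.List.pyGetD days (PySem.Int.mod (d + 1) 7) "", PySem.List.pyGetD days d ""]
      else
        [PySem.List.pyGetD days d "", PySem.List.pyGetD days (PySem.Int.mod (d + 1) 7) ""]
    else [PySem.List.pyGetD days d ""]

-- ===== PRECONDITION & SPEC =====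
def Spec_most_frequent_days (year : Int) (out : List String) : Prop := out = most_frequent_days_alt year
instance (year : Int) (out : List String) : Decidable (Spec_most_frequent_days year out) := by unfold Spec_most_frequent_days; infer_instance

-- ===== CLAIM (what is proved, stated in full; the proofs are below) =====
def Claim_equal_most_frequent_days : Prop := ∀ (year : Int), Dom_most_frequent_days year → Spec_most_frequent_days year (most_frequent_days year)

-- ===== LEMMAS AND PROOFS =====

theorem leap_eq_leapB (y : Int) : leap y = leapB y := by
  unfold leap leapB
  rw [PySem.Int.mod_eq_emod_of_pos (a := y) (by norm_num : (0:Int) < 400),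
      PySem.Int.mod_eq_emod_of_pos (a := y) (by norm_num : (0:Int) < 100),
      PySem.Int.mod_eq_emod_of_pos (a := y) (by norm_num : (0:Int) < 4)]
  by_cases h4 : y % 4 = 0 <;> by_cases h100 : y % 100 = 0 <;> by_cases h400 : y % 400 = 0 <;>
    simp [h4, h100, h400] <;> omega

theorem leap_step (m : Int) : (if leap m then (2 : Int) else 1) = 1 + (lcB m - lcB (m - 1)) := by
  unfold leap lcB
  rw [PySem.Int.mod_eq_emod_of_pos (a := m) (by norm_num : (0:Int) < 400),
      PySem.Int.mod_eq_emod_of_pos (a := m) (by norm_num : (0:Int) < 100),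
      PySem.Int.mod_eq_emod_of_pos (a := m) (by norm_num : (0:Int) < 4),
      PySem.Int.floordiv_eq_ediv_of_pos (a := m) (by norm_num : (0:Int) < 4),
      PySem.Int.floordiv_eq_ediv_of_pos (a := m) (by norm_num : (0:Int) < 100),
      PySem.Int.floordiv_eq_ediv_of_pos (a := m) (by norm_num : (0:Int) < 400),
      PySem.Int.floordiv_eq_ediv_of_pos (a := (m - 1)) (by norm_num : (0:Int) < 4),
      PySem.Int.floordiv_eq_ediv_of_pos (a := (m - 1)) (by norm_num : (0:Int) < 100),
      PySem.Int.floordiv_eq_ediv_of_pos (a := (m - 1)) (by norm_num : (0:Int) < 400)]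
  simp only [beq_iff_eq]
  split_ifs <;> first | omega | simp_all

theorem pvUp_closed (y : Int) : ∀ (n : Nat) (c d : Int), (y - c).toNat = n → c ≤ y →
    pvUp y c d = d + (y - c) + (lcB y - lcB c) := by
  intro n
  induction n with
  | zero =>
    intro c d hn hc
    have hcy : c = y := by omega
    rw [pvUp]
    simp [hcy]
  | succ k ih =>
    intro c d hn hc
    have h : c < y := by omega
    rw [pvUp]
    simp only [h, dif_pos]
    rw [ih (c + 1) _ (by omega) (by omega)]
    have := leap_step (c + 1)
    have hc1 : c + 1 - 1 = c := by ring
    rw [hc1] at this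
    rw [this]
    ring

theorem pvDown_closed (y : Int) : ∀ (n : Nat) (c d : Int), (c - y).toNat = n → y ≤ c →
    pvDown y c d = d - (c - y) - (lcB (c - 1) - lcB (y - 1)) := by
  intro n
  induction n with
  | zero =>
    intro c d hn hc
    have hcy : c = y := by omega
    rw [pvDown]
    simp [hcy]
  | succ k ih =>
    intro c d hn hc
    have h : c > y := by omega
    rw [pvDown]
    simp only [h, dif_pos]
    rw [ih (c - 1) _ (by omega) (by omega)]
    have := leap_step (c - 1)
    rw [this]
    ring

theorem mod_mod_sub_one (a : Int) :
    PySem.Int.mod (PySem.Int.mod a 7 - 1) 7 = PySem.Int.mod (a - 1) 7 := by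
  rw [PySem.Int.mod_eq_emod_of_pos (a := a) (by norm_num : (0:Int) < 7),
      PySem.Int.mod_eq_emod_of_pos (a := (a % 7 - 1)) (by norm_num : (0:Int) < 7),
      PySem.Int.mod_eq_emod_of_pos (a := (a - 1)) (by norm_num : (0:Int) < 7)]
  omega

theorem mod_mod_add_one (a : Int) :
    PySem.Int.mod (PySem.Int.mod a 7 + 1) 7 = PySem.Int.mod (a + 1) 7 := by
  rw [PySem.Int.mod_eq_emod_of_pos (a := a) (by norm_num : (0:Int) < 7),
      PySem.Int.mod_eq_emod_of_pos (a := (a % 7 + 1)) (by norm_num : (0:Int) < 7),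
      PySem.Int.mod_eq_emod_of_pos (a := (a + 1)) (by norm_num : (0:Int) < 7)]
  omega

-- ===== VERDICT (by name: the statement is the Claim_ definition above) =====
theorem most_frequent_days_spec : Claim_equal_most_frequent_days := by
  intro year _
  unfold Spec_most_frequent_days most_frequent_days most_frequent_days_alt pvDaysA pvDaysB
  by_cases h0 : year = 2000
  · simp [h0]
  · by_cases h1 : year > 2000
    · have hup : pvUp year 2000 6 = 6 + (year - 2000) + (lcB year - lcB 2000) :=
        pvUp_closed year (year - 2000).toNat 2000 6 rfl (by omega)
      simp only [beq_iff_eq, h0, if_false, h1, if_true, hup, leap_eq_leapB,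
        mod_mod_sub_one]
      split_ifs <;> rfl
    · have hlt : year < 2000 := by omega
      have hdown : pvDown year 2000 5 = 5 - (2000 - year) - (lcB (2000 - 1) - lcB (year - 1)) :=
        pvDown_closed year (2000 - year).toNat 2000 5 rfl (by omega)
      have h1999 : (2000 : Int) - 1 = 1999 := by norm_num
      rw [h1999] at hdown
      simp only [beq_iff_eq, h0, if_false, h1, hdown, leap_eq_leapB,
        mod_mod_add_one]
      split_ifs <;> rfl
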